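-- pv_equiv track=rewrite | github.com/nicolegrimaldos/CS303E | testpractice.py | essayCharacterCount
-- ===== SOURCE A (Python) =====
-- def essayCharacterCount(sent, dontCount):
--     # Write your code here
--     sent= sent.lower()
--     sent = sent.split(" ")
--     sub = 0
--     max = 0
--     for x in sent:
--         max += len(x)
--         for n in dontCount:
--             if n == x:
--                 sub += len(n)
--     characterCount = max - sub
--     return characterCount
-- ===== SOURCE B (Python) =====
-- def essayCharacterCount(sent, dontCount):
--     words = sent.lower().split(" ")
--     cnt = {}
--     for w in words:
--         cnt[w] = cnt.get(w, 0) + 1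
--     total = sum(len(w) for w in words)
--     sub = sum(len(n) * cnt.get(n, 0) for n in dontCount)
--     return total - sub
-- ===== Notes on version B (the rewrite author's own statement) =====
-- stated objective: alternative
-- what changed: B builds a frequency table of the words once and subtracts len(n)*count(n) in a single pass over dontCount, instead of A's inner scan of dontCount for every word; this trades A's O(W*D) nested loops for O(W+D) passes with hash-table overhead.
import Mathlib
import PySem

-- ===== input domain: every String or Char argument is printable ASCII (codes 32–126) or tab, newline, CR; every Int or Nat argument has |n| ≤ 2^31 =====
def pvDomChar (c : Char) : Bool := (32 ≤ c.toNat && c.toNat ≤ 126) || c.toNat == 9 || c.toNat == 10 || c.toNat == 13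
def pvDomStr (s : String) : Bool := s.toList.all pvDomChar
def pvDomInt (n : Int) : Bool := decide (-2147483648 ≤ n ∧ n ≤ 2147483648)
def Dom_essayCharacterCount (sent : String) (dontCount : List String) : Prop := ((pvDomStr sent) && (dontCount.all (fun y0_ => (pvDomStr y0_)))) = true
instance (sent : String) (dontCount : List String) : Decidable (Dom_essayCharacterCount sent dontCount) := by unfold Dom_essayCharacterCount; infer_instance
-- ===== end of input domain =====

-- B replaces A's inner scan of dontCount for every word by a frequency table of the words
-- built once, then subtracts len(n)*count(n) in one pass over dontCount (objective: alternative).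

-- ===== PORT A =====
-- split(" ") has a nonempty separator, so Python never raises: split? is always some, .getD [] is exact
def essayCharacterCount (sent : String) (dontCount : List String) : Int :=
  let sent1 := PySem.Str.lower sent
  let sent2 := (PySem.Str.split? sent1 " ").getD []
  let acc := sent2.foldl
    (fun (acc : Int × Int) x =>
      (acc.1 + PySem.Str.len x,
       dontCount.foldl (fun sub n => if n == x then sub + PySem.Str.len n else sub) acc.2))
    ((0 : Int), (0 : Int))
  acc.1 - acc.2

-- ===== PORT B =====
def essayCharacterCount_alt (sent : String) (dontCount : List String) : Int :=
  let words := (PySem.Str.split? (PySem.Str.lower sent) " ").getD []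
  let cnt := words.foldl (fun (d : PySem.Dict String Int) w => d.insert w (d.getD w 0 + 1)) PySem.Dict.empty
  let total := (words.map (fun w => PySem.Str.len w)).sum
  let sub := (dontCount.map (fun n => PySem.Str.len n * cnt.getD n 0)).sum
  total - sub

-- ===== PRECONDITION & SPEC =====
def Spec_essayCharacterCount (sent : String) (dontCount : List String) (out : Int) : Prop := out = essayCharacterCount_alt sent dontCount
instance (sent : String) (dontCount : List String) (out : Int) : Decidable (Spec_essayCharacterCount sent dontCount out) := by unfold Spec_essayCharacterCount; infer_instance

-- ===== CLAIM (what is proved, stated in full; the proofs are below) =====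
def Claim_equal_essayCharacterCount : Prop := ∀ (sent : String) (dontCount : List String), Dom_essayCharacterCount sent dontCount → Spec_essayCharacterCount sent dontCount (essayCharacterCount sent dontCount)

-- ===== LEMMAS AND PROOFS =====

-- A's inner loop over dontCount adds, for word x, the lengths of all matching entries
theorem pvInner (dc : List String) (x : String) (b : Int) :
    dc.foldl (fun sub n => if n == x then sub + PySem.Str.len n else sub) b
      = b + (dc.map (fun n => if n == x then PySem.Str.len n else 0)).sum := by
  induction dc generalizing b with
  | nil => simp
  | cons n t ih =>
    simp only [List.foldl_cons, List.map_cons, List.sum_cons, ih]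
    split_ifs <;> ring

-- A's pair-state loop splits into the two independent sums
theorem pvPair (dc ws : List String) (a b : Int) :
    ws.foldl
      (fun (acc : Int × Int) x =>
        (acc.1 + PySem.Str.len x,
         dc.foldl (fun sub n => if n == x then sub + PySem.Str.len n else sub) acc.2))
      (a, b)
    = (a + (ws.map (fun w => PySem.Str.len w)).sum,
       b + (ws.map (fun x => (dc.map (fun n => if n == x then PySem.Str.len n else 0)).sum)).sum) := by
  induction ws generalizing a b with
  | nil => simp
  | cons w t ih =>
    simp only [List.foldl_cons]
    rw [ih, pvInner]
    simp only [List.map_cons, List.sum_cons, Prod.mk.injEq]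
    constructor <;> ring

theorem pvCount (ws : List String) (n : String) (c : Int) :
    (ws.map (fun x => if n == x then c else 0)).sum = c * (ws.count n : Int) := by
  induction ws with
  | nil => simp
  | cons w t ih =>
    simp only [List.map_cons, List.sum_cons, List.count_cons, ih]
    by_cases h : n = w
    · simp [h]; ring
    · have h' : (w == n) = false := by simp [Ne.symm h]
      simp [h, h']

-- exchanging the two summations: per-word match sums = per-entry length × multiplicity
theorem pvSwap (ws dc : List String) :
    (ws.map (fun x => (dc.map (fun n => if n == x then PySem.Str.len n else 0)).sum)).sum
    = (dc.map (fun n => PySem.Str.len n * (ws.count n : Int))).sum := by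
  induction dc with
  | nil => simp
  | cons n t ih =>
    simp only [List.map_cons, List.sum_cons]
    rw [← ih, ← pvCount ws n (PySem.Str.len n), ← List.sum_map_add]

-- ===== VERDICT (by name: the statement is the Claim_ definition above) =====
theorem essayCharacterCount_spec : Claim_equal_essayCharacterCount := by
  intro sent dontCount _
  unfold Spec_essayCharacterCount essayCharacterCount essayCharacterCount_alt
  simp only [pvPair, PySem.Dict.getD_foldl_insert_add_one, PySem.Dict.getD_empty,
    zero_add, pvSwap]
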